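-- pv_equiv track=rewrite | github.com/jianningzhuang/CS1010X-Programming_Methodology | Midterms/midterm 2019.py | one_per_diagonal
-- ===== SOURCE A (Python) =====
-- def size(b):
--     return len(b)
--
-- def one_per_diagonal(b):
--     for i in range(size(b)):
--         sum = 0
--         x = i
--         for j in range(size(b)):
--             sum += b[x][j]
--             x = (x+1)%size(b)
--         if sum != 1:
--             return False
--     return True
-- ===== SOURCE B (Python) =====
-- def one_per_diagonal(b):
--     n = len(b)
--     sums = [0] * n
--     for j in range(n):
--         for x in range(n):
--             sums[(x - j) % n] += b[x][j]
--     return all(s == 1 for s in sums)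
-- ===== Notes on version B (the rewrite author's own statement) =====
-- stated objective: alternative
-- what changed: Replaces A's diagonal-by-diagonal rescan with early return by a single scatter-accumulate pass that adds every cell b[x][j] into a bucket array indexed by its wrapped diagonal (x-j) mod n, then checks all buckets equal 1.
-- outside the precondition, e.g. on one_per_diagonal([[5], [1, 1]]): A returns False, B raises IndexError
import Mathlib
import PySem

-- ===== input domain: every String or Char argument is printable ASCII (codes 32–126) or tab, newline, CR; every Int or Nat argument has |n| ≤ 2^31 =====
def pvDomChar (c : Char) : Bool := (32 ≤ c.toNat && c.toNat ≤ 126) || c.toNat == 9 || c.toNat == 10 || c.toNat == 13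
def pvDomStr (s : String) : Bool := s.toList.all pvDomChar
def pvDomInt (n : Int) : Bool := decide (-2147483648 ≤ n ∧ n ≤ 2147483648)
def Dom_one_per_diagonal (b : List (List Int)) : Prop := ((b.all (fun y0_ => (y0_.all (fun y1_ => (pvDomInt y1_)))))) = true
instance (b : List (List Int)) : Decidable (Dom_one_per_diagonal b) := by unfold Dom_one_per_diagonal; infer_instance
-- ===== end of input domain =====

-- B replaces A's per-diagonal rescan (with early return) by one scatter-accumulate pass
-- into a bucket array keyed by wrapped diagonal; alternative decomposition, same O(n^2) cost.

-- ===== PORT A =====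
def opdSize (b : List (List Int)) : Int := (b.length : Int)

-- inner 'for j in range(size(b))' body: sum += b[x][j]; x = (x+1) % size(b)
-- (b[x][j] ported as pyGetD: Pre_ keeps every accessed index in range)
def opdInnerStep (b : List (List Int)) (st : Int × Int) (j : Int) : Int × Int :=
  (st.1 + PySem.List.pyGetD (PySem.List.pyGetD b st.2 []) j 0,
   PySem.Int.mod (st.2 + 1) (opdSize b))

-- outer 'for i in range(size(b))' with the early 'return False'
def opdOuter (b : List (List Int)) : List Int → Bool
  | [] => true
  | i :: rest =>
      let st := (PySem.List.pyRange 0 (opdSize b) 1).foldl (opdInnerStep b) (0, i)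
      if st.1 ≠ 1 then false else opdOuter b rest

def one_per_diagonal (b : List (List Int)) : Bool :=
  opdOuter b (PySem.List.pyRange 0 (opdSize b) 1)

-- ===== PORT B =====
-- sums[(x-j) % n] += b[x][j]
def opdBump (b : List (List Int)) (n : Int) (j : Int) (sums : List Int) (x : Int) : List Int :=
  let idx := PySem.Int.mod (x - j) n
  PySem.List.pySetD sums idx
    (PySem.List.pyGetD sums idx 0 + PySem.List.pyGetD (PySem.List.pyGetD b x []) j 0)

def one_per_diagonal_alt (b : List (List Int)) : Bool :=
  let n : Int := (b.length : Int)
  let sums0 : List Int := List.replicate b.length 0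
  let sums := (PySem.List.pyRange 0 n 1).foldl
    (fun sums j => (PySem.List.pyRange 0 n 1).foldl (opdBump b n j) sums) sums0
  sums.all (fun s => s == 1)

-- ===== PRECONDITION & SPEC =====
-- Pre_ excludes ragged matrices (some row shorter than len(b)): there Python A either raises
-- IndexError or early-returns False before reaching a cell B's full pass reads (and B raises).
def Pre_one_per_diagonal (b : List (List Int)) : Prop :=
  ∀ row ∈ b, b.length ≤ row.length
instance (b : List (List Int)) : Decidable (Pre_one_per_diagonal b) := by
  unfold Pre_one_per_diagonal; infer_instance

def pvWitness_one_per_diagonal : List (List Int) := [[1, 0], [0, 1]]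

def Spec_one_per_diagonal (b : List (List Int)) (out : Bool) : Prop := out = one_per_diagonal_alt b
instance (b : List (List Int)) (out : Bool) : Decidable (Spec_one_per_diagonal b out) := by
  unfold Spec_one_per_diagonal; infer_instance

-- ===== CLAIM (what is proved, stated in full; the proofs are below) =====
def Claim_equal_one_per_diagonal : Prop := ∀ (b : List (List Int)), Dom_one_per_diagonal b → Pre_one_per_diagonal b → Spec_one_per_diagonal b (one_per_diagonal b)

-- ===== LEMMAS AND PROOFS =====

-- b[x][j] as both ports total-read it, with Nat indices
def opdCell (b : List (List Int)) (x j : Nat) : Int := (b.getD x []).getD j 0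

-- the sum of wrapped diagonal i
def opdDiag (b : List (List Int)) (i : Nat) : Int :=
  ((List.range b.length).map (fun m => opdCell b ((i + m) % b.length) m)).sum

-- the bucket index (x - j) % n of B, as a Nat
def opdIdx (n j x : Nat) : Nat := (PySem.Int.mod ((x : Int) - (j : Int)) (n : Int)).toNat

-- B's inner-loop step with Nat indices
def opdBumpN (b : List (List Int)) (n j : Nat) (s : List Int) (x : Nat) : List Int :=
  s.set (opdIdx n j x) (s.getD (opdIdx n j x) 0 + opdCell b x j)

-- B's inner loop over a whole column sweep, Nat form
def opdPass (b : List (List Int)) (n : Nat) (s : List Int) (jn : Nat) : List Int :=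
  (List.range n).foldl (opdBumpN b n jn) s

theorem opd_pyRange_nat (n : Nat) :
    PySem.List.pyRange 0 (n : Int) 1 = (List.range n).map (fun (k : Nat) => (k : Int)) := by
  rw [PySem.List.pyRange_one, show (((n : Int) - 0).toNat) = n by omega]
  exact List.map_congr_left (fun k _ => by simp)

theorem opd_mod_eq (n j x : Nat) (hn : 0 < n) (hx : x < n) (hj : j < n) :
    PySem.Int.mod ((x : Int) - (j : Int)) (n : Int)
      = if j ≤ x then ((x - j : Nat) : Int) else (((x + n) - j : Nat) : Int) := by
  rw [PySem.Int.mod_eq_emod_of_pos (by exact_mod_cast hn)]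
  split_ifs with h
  · rw [show ((x : Int) - (j : Int)) = ((x - j : Nat) : Int) by omega]
    exact Int.emod_eq_of_lt (by omega) (by omega)
  · rw [show ((x : Int) - (j : Int)) = (((x + n) - j : Nat) : Int) + (n : Int) * (-1) by push_cast; omega,
        Int.add_mul_emod_self_left]
    exact Int.emod_eq_of_lt (by omega) (by omega)

theorem opd_idx_lt (n j x : Nat) (hn : 0 < n) (hx : x < n) (hj : j < n) :
    opdIdx n j x < n := by
  unfold opdIdx
  rw [opd_mod_eq n j x hn hx hj]
  split_ifs with h <;> simp <;> omega

theorem opd_nat_mod_eq (n d j : Nat) (hn : 0 < n) (hd : d < n) (hj : j < n) :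
    (d + j) % n = if n ≤ d + j then d + j - n else d + j := by
  split_ifs with h
  · rw [Nat.mod_eq_sub_mod h, Nat.mod_eq_of_lt (by omega)]
  · exact Nat.mod_eq_of_lt (by omega)

theorem opd_idx_eq_iff (n j x d : Nat) (hn : 0 < n) (hx : x < n) (hj : j < n) (hd : d < n) :
    opdIdx n j x = d ↔ x = (d + j) % n := by
  unfold opdIdx
  rw [opd_mod_eq n j x hn hx hj, opd_nat_mod_eq n d j hn hd hj]
  split_ifs with h1 h2 <;> simp <;> omega

-- ===== A-side characterisation =====

theorem opd_innerA (b : List (List Int)) (hn : 0 < b.length) :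
    ∀ (cnt t i : Nat) (sum0 : Int), i < b.length →
      (List.range' t cnt).foldl (fun (st : Int × Int) (k : Nat) => opdInnerStep b st (k : Int))
          (sum0, (i : Int))
        = (sum0 + ((List.range cnt).map (fun m => opdCell b ((i + m) % b.length) (t + m))).sum,
           (((i + cnt) % b.length : Nat) : Int)) := by
  intro cnt
  induction cnt with
  | zero =>
      intro t i sum0 hi
      simp [Nat.mod_eq_of_lt hi]
  | succ cnt ih =>
      intro t i sum0 hi
      rw [List.range'_succ, List.foldl_cons]
      have hstep : opdInnerStep b (sum0, (i : Int)) (t : Int)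
          = (sum0 + opdCell b i t, (((i + 1) % b.length : Nat) : Int)) := by
        have hm : PySem.Int.mod ((i : Int) + 1) ((b.length : Nat) : Int)
            = (((i + 1) % b.length : Nat) : Int) := by
          rw [show ((i : Int) + 1) = (((i + 1 : Nat)) : Int) by omega]
          exact PySem.Int.mod_natCast _ _
        unfold opdInnerStep opdSize
        rw [hm]
        simp [opdCell]
      rw [hstep, ih (t + 1) ((i + 1) % b.length) (sum0 + opdCell b i t) (Nat.mod_lt _ hn)]
      have hsnd : ((i + 1) % b.length + cnt) % b.length = (i + (cnt + 1)) % b.length := by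
        rw [Nat.mod_add_mod, show i + 1 + cnt = i + (cnt + 1) by omega]
      have hfst : ((List.range cnt).map
            (fun m => opdCell b (((i + 1) % b.length + m) % b.length) (t + 1 + m))).sum
          = ((List.range cnt).map
            (fun m => opdCell b ((i + Nat.succ m) % b.length) (t + Nat.succ m))).sum := by
        congr 1
        apply List.map_congr_left
        intro m _
        rw [Nat.mod_add_mod, show i + 1 + m = i + Nat.succ m by omega,
            show t + 1 + m = t + Nat.succ m by omega]
      rw [hsnd, hfst, List.range_succ_eq_map]
      simp only [List.map_cons, List.map_map, List.sum_cons, Function.comp_def,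
        Nat.add_zero, Nat.mod_eq_of_lt hi]
      rw [add_assoc]

theorem opd_outerA (b : List (List Int)) (hn : 0 < b.length) :
    ∀ (l : List Nat), (∀ i ∈ l, i < b.length) →
      opdOuter b (l.map (fun (k : Nat) => (k : Int))) = l.all (fun i => opdDiag b i == 1) := by
  intro l
  induction l with
  | nil => intro _; simp [opdOuter]
  | cons i rest ih =>
      intro h
      have hi : i < b.length := h i (by simp)
      have hrest : ∀ x ∈ rest, x < b.length := fun x hx => h x (by simp [hx])
      have hfold : (PySem.List.pyRange 0 (opdSize b) 1).foldl (opdInnerStep b) (0, (i : Int))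
          = (opdDiag b i, (((i + b.length) % b.length : Nat) : Int)) := by
        rw [show opdSize b = ((b.length : Nat) : Int) from rfl, opd_pyRange_nat,
            List.foldl_map, List.range_eq_range',
            opd_innerA b hn b.length 0 i 0 hi]
        simp [opdDiag]
      simp only [List.map_cons]
      show (if ((PySem.List.pyRange 0 (opdSize b) 1).foldl (opdInnerStep b) (0, (i : Int))).1 ≠ 1
            then false else opdOuter b (rest.map (fun (k : Nat) => (k : Int))))
          = (i :: rest).all (fun i => opdDiag b i == 1)
      rw [hfold]
      by_cases hd : opdDiag b i = 1
      · simp [hd, ih hrest]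
      · simp [hd]

theorem opd_A_eq (b : List (List Int)) :
    one_per_diagonal b = (List.range b.length).all (fun i => opdDiag b i == 1) := by
  rcases Nat.eq_zero_or_pos b.length with h0 | hn
  · have hr : PySem.List.pyRange 0 (opdSize b) 1 = [] := by
      rw [show opdSize b = ((b.length : Nat) : Int) from rfl, h0]
      exact PySem.List.pyRange_one_eq_nil (by simp)
    unfold one_per_diagonal
    rw [hr, h0]
    simp [opdOuter]
  · unfold one_per_diagonal
    rw [show opdSize b = ((b.length : Nat) : Int) from rfl, opd_pyRange_nat]
    exact opd_outerA b hn (List.range b.length) (by simp)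

-- ===== B-side characterisation =====

theorem opd_bump_cast (b : List (List Int)) {n : Nat} (hn : 0 < n) (j x : Nat) (s : List Int) :
    opdBump b (n : Int) (j : Int) s (x : Int) = opdBumpN b n j s x := by
  unfold opdBump opdBumpN opdIdx opdCell
  have hpos : (0 : Int) < (n : Int) := by exact_mod_cast hn
  have hnn : 0 ≤ PySem.Int.mod ((x : Int) - (j : Int)) (n : Int) := PySem.Int.mod_nonneg _ hpos
  rw [show PySem.Int.mod ((x : Int) - (j : Int)) (n : Int)
        = (((PySem.Int.mod ((x : Int) - (j : Int)) (n : Int)).toNat : Nat) : Int) by omega]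
  simp only [PySem.List.pySetD_natCast, PySem.List.pyGetD_natCast, Int.toNat_natCast]

theorem opd_getD_set (s : List Int) (k d : Nat) (v : Int) (hk : k < s.length) :
    (s.set k v).getD d 0 = if k = d then v else s.getD d 0 := by
  simp only [List.getD_eq_getElem?_getD, List.getElem?_set, hk]
  split_ifs <;> simp_all

theorem opd_bucket_fold (b : List (List Int)) (n j : Nat) (hn : 0 < n) (hj : j < n) :
    ∀ (l : List Nat) (s : List Int), (∀ x ∈ l, x < n) → s.length = n →
      (l.foldl (opdBumpN b n j) s).length = n ∧
      ∀ d, d < n → (l.foldl (opdBumpN b n j) s).getD d 0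
        = s.getD d 0 + ((l.filter (fun x => opdIdx n j x == d)).map (fun x => opdCell b x j)).sum := by
  intro l
  induction l with
  | nil => intro s _ hs; exact ⟨hs, fun d _ => by simp⟩
  | cons x rest ih =>
      intro s hl hs
      have hx : x < n := hl x (by simp)
      have hk : opdIdx n j x < s.length := by rw [hs]; exact opd_idx_lt n j x hn hx hj
      have hs' : (opdBumpN b n j s x).length = n := by
        unfold opdBumpN; rw [List.length_set]; exact hs
      obtain ⟨hlen, hget⟩ := ih (opdBumpN b n j s x) (fun y hy => hl y (by simp [hy])) hs'
      refine ⟨by simpa using hlen, fun d hd => ?_⟩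
      rw [List.foldl_cons, hget d hd,
          show opdBumpN b n j s x
            = s.set (opdIdx n j x) (s.getD (opdIdx n j x) 0 + opdCell b x j) from rfl,
          opd_getD_set s _ d _ hk, List.filter_cons]
      by_cases he : opdIdx n j x = d
      · simp [he]
        ring
      · simp [he]

theorem opd_filter_single (n j d : Nat) (hn : 0 < n) (hj : j < n) (hd : d < n) :
    (List.range n).filter (fun x => opdIdx n j x == d) = [(d + j) % n] := by
  have hch : ∀ x ∈ List.range n, (opdIdx n j x == d) = (x == (d + j) % n) := by
    intro x hx
    simp only [List.mem_range] at hx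
    rw [Bool.eq_iff_iff]
    simp only [beq_iff_eq]
    exact opd_idx_eq_iff n j x d hn hx hj hd
  rw [List.filter_congr hch, List.filter_beq,
      List.count_eq_one_of_mem List.nodup_range (by simp [Nat.mod_lt _ hn]),
      List.replicate_one]

theorem opd_B_eq (b : List (List Int)) :
    one_per_diagonal_alt b = (List.range b.length).all (fun i => opdDiag b i == 1) := by
  have hB : one_per_diagonal_alt b
      = ((PySem.List.pyRange 0 ((b.length : Nat) : Int) 1).foldl
          (fun sums j => (PySem.List.pyRange 0 ((b.length : Nat) : Int) 1).foldl
            (opdBump b ((b.length : Nat) : Int) j) sums)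
          (List.replicate b.length 0)).all (fun s => s == 1) := rfl
  rcases Nat.eq_zero_or_pos b.length with h0 | hn
  · rw [hB, h0, show PySem.List.pyRange 0 (((0 : Nat)) : Int) 1 = [] from
          PySem.List.pyRange_one_eq_nil (by simp)]
    simp
  · set n := b.length with hnb
    have h1 : one_per_diagonal_alt b
        = ((List.range n).foldl (opdPass b n) (List.replicate n 0)).all (fun s => s == 1) := by
      rw [hB, opd_pyRange_nat, List.foldl_map]
      congr 1
      apply PySem.List.foldl_congr_mem
      intro acc k _
      rw [List.foldl_map]
      unfold opdPass
      apply PySem.List.foldl_congr_mem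
      intro acc' y _
      exact opd_bump_cast b hn k y acc'
    have hmain : ∀ (lj : List Nat) (s : List Int), (∀ j ∈ lj, j < n) → s.length = n →
        (lj.foldl (opdPass b n) s).length = n ∧
        ∀ d, d < n → (lj.foldl (opdPass b n) s).getD d 0
          = s.getD d 0 + (lj.map (fun j => opdCell b ((d + j) % n) j)).sum := by
      intro lj
      induction lj with
      | nil => intro s _ hs; exact ⟨hs, fun d _ => by simp⟩
      | cons j rest ih =>
          intro s hl hs
          have hj : j < n := hl j (by simp)
          obtain ⟨hlen1, hget1⟩ :=
            opd_bucket_fold b n j hn hj (List.range n) s (by simp) hs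
          obtain ⟨hlen, hget⟩ := ih (opdPass b n s j) (fun y hy => hl y (by simp [hy])) hlen1
          refine ⟨hlen, fun d hd => ?_⟩
          rw [List.foldl_cons, hget d hd,
              show opdPass b n s j = (List.range n).foldl (opdBumpN b n j) s from rfl,
              hget1 d hd, opd_filter_single n j d hn hj hd]
          simp [List.sum_cons]
          ring
    obtain ⟨hlen, hget⟩ := hmain (List.range n) (List.replicate n 0) (by simp) (by simp)
    have hgetfin : ∀ d, d < n →
        ((List.range n).foldl (opdPass b n) (List.replicate n 0)).getD d 0 = opdDiag b d := by
      intro d hd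
      rw [hget d hd, List.getD_eq_getElem?_getD, List.getElem?_replicate,
          if_pos (hnb ▸ hd)]
      simp [opdDiag, ← hnb]
    set sums := (List.range n).foldl (opdPass b n) (List.replicate n 0) with hsums
    rw [h1, Bool.eq_iff_iff]
    simp only [List.all_eq_true, List.mem_range, beq_iff_eq]
    constructor
    · intro h i hi
      have hilen : i < sums.length := by rw [hlen]; exact hi
      have hmem : sums.getD i 0 ∈ sums := by
        rw [List.getD_eq_getElem sums 0 hilen]
        exact List.getElem_mem hilen
      have := h _ hmem
      rwa [hgetfin i hi] at this
    · intro h x hx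
      obtain ⟨i, hi, hix⟩ := List.mem_iff_getElem.mp hx
      have hi' : i < n := by rwa [hlen] at hi
      have hxv : sums.getD i 0 = x := by rw [List.getD_eq_getElem sums 0 hi]; exact hix
      rw [← hxv, hgetfin i hi']
      exact h i hi'

-- ===== VERDICT (by name: the statement is the Claim_ definition above) =====
theorem one_per_diagonal_spec : Claim_equal_one_per_diagonal := by
  intro b _ _
  unfold Spec_one_per_diagonal
  rw [opd_A_eq, opd_B_eq]
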